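-- pv_equiv track=rewrite | github.com/brhumphe/iMotions-Data-Processing | csv_parse_test.py | remove_events
-- ===== SOURCE A (Python) =====
-- def remove_events(events, remove):
--     for event in events:
--         event_source__split = event['EventSource'].split('|')
--         for r in remove:
--             if r in event_source__split:
--                 event_source__split.remove(r)
--
--         if event_source__split:
--             yield event
-- ===== SOURCE B (Python) =====
-- def remove_events(events, remove):
--     # Budget-dict single pass: count removal tokens once into a dict, then for
--     # each event walk its tokens left to right, spending budget; the first token
--     # without remaining budget proves the residue is non-empty -> keep the event.
--     removals = {}
--     for r in remove:
--         removals[r] = removals.get(r, 0) + 1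
--     for event in events:
--         budget = dict(removals)
--         kept = False
--         for t in event['EventSource'].split('|'):
--             if budget.get(t, 0) > 0:
--                 budget[t] -= 1
--             else:
--                 kept = True
--                 break
--         if kept:
--             yield event
-- ===== Notes on version B (the rewrite author's own statement) =====
-- stated objective: faster
-- what changed: Replaces A's destructive nested loop (for each removal token, a membership scan plus list.remove on the split tokens) by a budget dict built once from remove and a single left-to-right pass over each event's tokens with early exit at the first token whose budget is exhausted.
import Mathlib
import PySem

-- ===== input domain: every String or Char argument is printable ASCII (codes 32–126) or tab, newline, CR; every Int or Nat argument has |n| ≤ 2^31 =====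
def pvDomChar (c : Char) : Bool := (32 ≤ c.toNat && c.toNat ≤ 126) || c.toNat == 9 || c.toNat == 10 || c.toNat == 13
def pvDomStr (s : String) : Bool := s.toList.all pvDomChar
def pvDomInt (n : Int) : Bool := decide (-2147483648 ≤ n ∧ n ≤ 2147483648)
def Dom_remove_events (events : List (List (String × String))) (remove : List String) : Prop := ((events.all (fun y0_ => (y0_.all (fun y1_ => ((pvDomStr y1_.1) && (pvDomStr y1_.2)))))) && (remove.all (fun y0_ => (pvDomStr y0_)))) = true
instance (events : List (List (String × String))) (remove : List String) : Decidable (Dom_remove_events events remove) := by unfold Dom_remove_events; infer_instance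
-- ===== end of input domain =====

-- B builds a budget dict from `remove` once and scans each event's tokens left to right with early exit (objective: faster).

-- ===== PORT A =====
-- literal port of A: split the source, then for each r in remove 'if r in ts: ts.remove(r)',
-- keep the event iff the remaining list is non-empty; events is consumed as a list (generator fully drained)
def remove_events (events : List (List (String × String))) (remove : List String) : List (List (String × String)) :=
  events.foldl (fun acc event =>
    match PySem.Dict.get? ⟨event⟩ "EventSource" with
    | none => acc  -- Python raises KeyError here; excluded by Pre_remove_events
    | some src =>
      let ts0 := (PySem.Str.split? src "|").getD []  -- sep "|" ≠ "": never none
      let ts := remove.foldl (fun ts r => if ts.contains r then ts.erase r else ts) ts0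
      if ts.isEmpty then acc else acc ++ [event]) []

-- ===== PORT B =====
-- Source B's inner token loop: spend budget per token; first token with no budget left breaks with kept = True.
-- 'budget[t] -= 1' acts on a key known present (its budget is > 0), so Dict.modify with default 0 is exact.
def pvConsume (budget : PySem.Dict String Int) : List String → Bool
  | [] => false
  | t :: ts =>
    if 0 < budget.getD t 0 then pvConsume (budget.modify t 0 (· - 1)) ts
    else true

-- Source B's event loop: yield the events whose token walk set kept = True
def pvFilterEvents (removals : PySem.Dict String Int) :
    List (List (String × String)) → List (List (String × String))
  | [] => []
  | event :: rest =>
    match PySem.Dict.get? (⟨event⟩ : PySem.Dict String String) "EventSource" with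
    | none => pvFilterEvents removals rest  -- Python raises KeyError here; excluded by Pre_remove_events
    | some src =>
      if pvConsume removals ((PySem.Str.split? src "|").getD [])  -- sep "|" ≠ "": never none
      then event :: pvFilterEvents removals rest
      else pvFilterEvents removals rest

def remove_events_alt (events : List (List (String × String))) (remove : List String) : List (List (String × String)) :=
  -- removals = {}; for r in remove: removals[r] = removals.get(r, 0) + 1
  let removals := remove.foldl (fun d r => d.insert r (d.getD r 0 + 1)) PySem.Dict.empty
  pvFilterEvents removals events

-- ===== PRECONDITION & SPEC =====
-- Pre_ excludes exactly the events lacking an 'EventSource' key, on which Python A raises KeyError.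
def Pre_remove_events (events : List (List (String × String))) (remove : List String) : Prop :=
  ∀ e ∈ events, (PySem.Dict.get? (⟨e⟩ : PySem.Dict String String) "EventSource").isSome
instance (events : List (List (String × String))) (remove : List String) : Decidable (Pre_remove_events events remove) := by unfold Pre_remove_events; infer_instance
def pvWitness_remove_events : (List (List (String × String))) × List String :=
  ([[("EventSource", "a|b")], [("EventSource", "a")]], ["a"])

def Spec_remove_events (events : List (List (String × String))) (remove : List String) (out : List (List (String × String))) : Prop := out = remove_events_alt events remove
instance (events : List (List (String × String))) (remove : List String) (out : List (List (String × String))) : Decidable (Spec_remove_events events remove out) := by unfold Spec_remove_events; infer_instance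

-- ===== CLAIM (what is proved, stated in full; the proofs are below) =====
def Claim_equal_remove_events : Prop := ∀ (events : List (List (String × String))) (remove : List String), Dom_remove_events events remove → Pre_remove_events events remove → Spec_remove_events events remove (remove_events events remove)

-- ===== LEMMAS AND PROOFS =====

-- after A's removal loop, each token's count is the truncated difference of the counts
theorem count_removal_fold (rs : List String) (ts : List String) (t : String) :
    (rs.foldl (fun ts r => if ts.contains r then ts.erase r else ts) ts).count t
      = ts.count t - rs.count t := by
  induction rs generalizing ts with
  | nil => simp
  | cons r rs ih =>
    simp only [List.foldl_cons, ih]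
    by_cases hrt : t = r
    · subst hrt
      by_cases hc : ts.contains t
      · simp only [hc, if_pos, List.count_erase_self, List.count_cons_self]
        omega
      · have h0 : ts.count t = 0 :=
          List.count_eq_zero.mpr (by simpa [List.contains_iff_mem] using hc)
        simp only [hc, Bool.false_eq_true, if_neg, not_false_iff, List.count_cons_self]
        omega
    · have hcons : (r :: rs).count t = rs.count t := List.count_cons_of_ne (Ne.symm hrt)
      by_cases hc : ts.contains r
      · simp only [hc, if_pos, List.count_erase_of_ne hrt, hcons]
      · simp only [hc, Bool.false_eq_true, if_neg, not_false_iff, hcons]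

-- the budget walk returns False exactly when every token's multiplicity fits inside its budget
theorem consume_eq_false_iff (b : PySem.Dict String Int) (ts : List String)
    (hnn : ∀ t, 0 ≤ b.getD t 0) :
    pvConsume b ts = false ↔ ∀ t, (ts.count t : Int) ≤ b.getD t 0 := by
  induction ts generalizing b with
  | nil => simpa [pvConsume] using hnn
  | cons t ts ih =>
    by_cases hpos : 0 < b.getD t 0
    · have hnn' : ∀ s, 0 ≤ (b.modify t 0 (· - 1)).getD s 0 := by
        intro s
        rw [PySem.Dict.getD_modify]
        split_ifs with hs
        · subst hs; omega
        · exact hnn s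
      rw [show pvConsume b (t :: ts) = pvConsume (b.modify t 0 (· - 1)) ts by
            simp [pvConsume, hpos], ih _ hnn']
      constructor
      · intro h s
        have hs := h s
        rw [PySem.Dict.getD_modify] at hs
        have hcount : (t :: ts).count s = ts.count s + (if t = s then 1 else 0) := by
          simp [List.count_cons]
        rw [hcount]
        by_cases hst : s = t
        · subst hst
          simp only [eq_self_iff_true, if_true] at hs ⊢
          push_cast; omega
        · rw [if_neg hst] at hs
          rw [if_neg (Ne.symm hst)]
          push_cast; omega
      · intro h s
        have hs := h s
        rw [PySem.Dict.getD_modify]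
        have hcount : (t :: ts).count s = ts.count s + (if t = s then 1 else 0) := by
          simp [List.count_cons]
        rw [hcount] at hs
        by_cases hst : s = t
        · subst hst
          simp only [eq_self_iff_true, if_true] at hs ⊢
          push_cast at hs ⊢; omega
        · rw [if_neg (Ne.symm hst)] at hs
          rw [if_neg hst]
          push_cast at hs; omega
    · rw [show pvConsume b (t :: ts) = true by simp [pvConsume, hpos]]
      simp only [Bool.true_eq_false, false_iff]
      intro h
      have hs := h t
      have hcount : (t :: ts).count t = ts.count t + 1 := by simp
      rw [hcount] at hs
      push_cast at hs
      omega
-- A keeps an event iff B's budget walk breaks out with kept = True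
theorem keep_iff (rs : List String) (ts : List String) :
    (rs.foldl (fun ts r => if ts.contains r then ts.erase r else ts) ts).isEmpty
      = !pvConsume (PySem.Dict.counter rs) ts := by
  have hnn : ∀ t, 0 ≤ (PySem.Dict.counter rs).getD t 0 := by
    intro t; rw [PySem.Dict.getD_counter]; positivity
  cases hc : pvConsume (PySem.Dict.counter rs) ts with
  | false =>
    -- every token fits inside remove's counts: the residue is empty
    have hall := (consume_eq_false_iff _ _ hnn).mp hc
    simp only [Bool.not_false]
    rw [List.isEmpty_iff]
    by_contra hne
    obtain ⟨x, hx⟩ := List.exists_mem_of_ne_nil _ hne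
    have hcnt := count_removal_fold rs ts x
    have hpos : 0 < ((rs.foldl (fun ts r => if ts.contains r then ts.erase r else ts) ts).count x) :=
      List.count_pos_iff.mpr hx
    have hle := hall x
    rw [PySem.Dict.getD_counter] at hle
    have : ts.count x ≤ rs.count x := by exact_mod_cast hle
    omega
  | true =>
    -- some token runs out of budget: the residue is non-empty
    simp only [Bool.not_true]
    rw [List.isEmpty_eq_false_iff_exists_mem]
    by_contra hnone
    push_neg at hnone
    have : pvConsume (PySem.Dict.counter rs) ts = false := by
      rw [consume_eq_false_iff _ _ hnn]
      intro t
      rw [PySem.Dict.getD_counter]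
      have hcnt := count_removal_fold rs ts t
      have h0 : (rs.foldl (fun ts r => if ts.contains r then ts.erase r else ts) ts).count t = 0 := by
        rw [List.count_eq_zero]; exact hnone t
      have : ts.count t ≤ rs.count t := by omega
      exact_mod_cast this
    simp [this] at hc

-- A's accumulator fold produces B's structural filter
theorem foldl_eq_filter (remove : List String) (events : List (List (String × String)))
    (acc : List (List (String × String))) :
    events.foldl (fun acc event =>
      match PySem.Dict.get? (⟨event⟩ : PySem.Dict String String) "EventSource" with
      | none => acc
      | some src =>
        let ts0 := (PySem.Str.split? src "|").getD []
        let ts := remove.foldl (fun ts r => if ts.contains r then ts.erase r else ts) ts0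
        if ts.isEmpty then acc else acc ++ [event]) acc
      = acc ++ pvFilterEvents (PySem.Dict.counter remove) events := by
  induction events generalizing acc with
  | nil => simp [pvFilterEvents]
  | cons event rest ih =>
    simp only [List.foldl_cons]
    cases hsrc : PySem.Dict.get? (⟨event⟩ : PySem.Dict String String) "EventSource" with
    | none => simp only [pvFilterEvents, hsrc, ih]
    | some src =>
      simp only [pvFilterEvents, hsrc]
      rw [keep_iff]
      cases hc : pvConsume (PySem.Dict.counter remove) ((PySem.Str.split? src "|").getD []) with
      | false => simp only [Bool.not_false, if_pos rfl, if_true]; exact ih acc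
      | true =>
        simp only [Bool.not_true, Bool.false_eq_true, if_neg, if_false, not_false_iff]
        rw [ih (acc ++ [event])]
        simp

-- ===== VERDICT (by name: the statement is the Claim_ definition above) =====
theorem remove_events_spec : Claim_equal_remove_events := by
  intro events remove _ _
  unfold Spec_remove_events remove_events remove_events_alt
  rw [PySem.Dict.foldl_insert_getD_add_one_eq_counter]
  simpa using foldl_eq_filter remove events []
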